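-- pv_equiv track=rewrite | github.com/lahi0008/ProjetHangman | projetHangman.py | affiche_lettres_trouvees
-- ===== SOURCE A (Python) =====
-- def affiche_lettres_trouvees(positions,mot_a_trouver):
--
--     mot_a_afficher=" "
--
--     position_actuelle=0
--
--     for lettre_mot in mot_a_trouver:
--         if position_actuelle in positions :
--             mot_a_afficher+=lettre_mot
--         else:
--             mot_a_afficher+='-'
--         position_actuelle+=1
--     return mot_a_afficher
-- ===== SOURCE B (Python) =====
-- def affiche_lettres_trouvees(positions, mot_a_trouver):
--     res = ['-'] * len(mot_a_trouver)
--     for p in positions: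
--         if 0 <= p < len(mot_a_trouver):
--             res[p] = mot_a_trouver[p]
--     return ' ' + ''.join(res)
-- ===== Notes on version B (the rewrite author's own statement) =====
-- stated objective: faster
-- what changed: Instead of scanning every character and testing membership in positions, B allocates a dash array and scatters the letters at the given in-range positions, then joins once.
import Mathlib
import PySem

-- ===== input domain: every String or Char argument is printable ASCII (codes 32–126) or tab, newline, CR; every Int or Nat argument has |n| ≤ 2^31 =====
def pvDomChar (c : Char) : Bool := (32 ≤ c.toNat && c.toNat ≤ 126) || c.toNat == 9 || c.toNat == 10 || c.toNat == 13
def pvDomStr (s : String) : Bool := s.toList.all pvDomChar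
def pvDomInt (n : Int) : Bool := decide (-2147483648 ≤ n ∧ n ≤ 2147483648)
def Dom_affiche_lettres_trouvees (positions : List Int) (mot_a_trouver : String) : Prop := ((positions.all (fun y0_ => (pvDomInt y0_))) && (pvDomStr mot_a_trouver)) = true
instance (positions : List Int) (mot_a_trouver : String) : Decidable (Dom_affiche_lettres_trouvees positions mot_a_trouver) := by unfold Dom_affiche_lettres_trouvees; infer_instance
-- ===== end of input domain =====

-- B scatters the found letters into a pre-filled dash list instead of testing
-- membership in positions for every character of the word.

-- ===== PORT A =====
-- loop state: (mot_a_afficher, position_actuelle); branch order as in Python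
def affiche_lettres_trouvees (positions : List Int) (mot_a_trouver : String) : String :=
  (mot_a_trouver.toList.foldl
    (fun (st : String × Int) lettre_mot =>
      (if st.2 ∈ positions then st.1.push lettre_mot else st.1.push '-', st.2 + 1))
    (" ", 0)).1

-- ===== PORT B =====
-- res = ['-'] * len(word); scatter word[p] at each in-range p; ' ' + ''.join(res)
def affiche_lettres_trouvees_alt (positions : List Int) (mot_a_trouver : String) : String :=
  " " ++ String.ofList
    (positions.foldl
      (fun (res : List Char) p =>
        if 0 ≤ p ∧ p < (mot_a_trouver.toList.length : Int) then
          res.set p.toNat (mot_a_trouver.toList.getD p.toNat '-')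
        else res)
      (List.replicate mot_a_trouver.toList.length '-'))

-- ===== PRECONDITION & SPEC =====
def Spec_affiche_lettres_trouvees (positions : List Int) (mot_a_trouver : String) (out : String) : Prop := out = affiche_lettres_trouvees_alt positions mot_a_trouver
instance (positions : List Int) (mot_a_trouver : String) (out : String) : Decidable (Spec_affiche_lettres_trouvees positions mot_a_trouver out) := by unfold Spec_affiche_lettres_trouvees; infer_instance

-- ===== CLAIM (what is proved, stated in full; the proofs are below) =====
def Claim_equal_affiche_lettres_trouvees : Prop := ∀ (positions : List Int) (mot_a_trouver : String), Dom_affiche_lettres_trouvees positions mot_a_trouver → Spec_affiche_lettres_trouvees positions mot_a_trouver (affiche_lettres_trouvees positions mot_a_trouver)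

-- ===== LEMMAS AND PROOFS =====

-- reference result: dash/letter choice at counter k, k+1, …
def pvMask (positions : List Int) : List Char → Int → List Char
  | [], _ => []
  | c :: cs, k => (if k ∈ positions then c else '-') :: pvMask positions cs (k + 1)

theorem pvMask_length (positions : List Int) (w : List Char) (k : Int) :
    (pvMask positions w k).length = w.length := by
  induction w generalizing k with
  | nil => rfl
  | cons c cs ih => simp [pvMask, ih]

theorem pvMask_getElem (positions : List Int) (w : List Char) (k : Int) (i : ℕ)
    (hi : i < (pvMask positions w k).length) :
    (pvMask positions w k)[i] =
      if (k + (i : Int)) ∈ positions then w[i]'(by simpa [pvMask_length] using hi) else '-' := by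
  induction w generalizing k i with
  | nil => simp [pvMask] at hi
  | cons c cs ih =>
    cases i with
    | zero => simp [pvMask]
    | succ j =>
      have := ih (k := k + 1) (i := j) (by simpa [pvMask, pvMask_length] using hi)
      simp [pvMask, this, add_comm, add_left_comm]

-- A's fold appends exactly the mask
theorem foldA_eq (positions : List Int) (w : List Char) (pre : String) (k : Int) :
    (w.foldl
      (fun (st : String × Int) lettre_mot =>
        (if st.2 ∈ positions then st.1.push lettre_mot else st.1.push '-', st.2 + 1))
      (pre, k)).1 = pre ++ String.ofList (pvMask positions w k) := by
  induction w generalizing pre k with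
  | nil =>
    apply String.ext
    simp [pvMask]
  | cons c cs ih =>
    by_cases h : k ∈ positions <;>
      · simp only [List.foldl, h, if_pos, pvMask, ih]
        apply String.ext
        simp [String.toList_push]

-- B's step function
def pvStep (w : List Char) (res : List Char) (p : Int) : List Char :=
  if 0 ≤ p ∧ p < (w.length : Int) then res.set p.toNat (w.getD p.toNat '-') else res

theorem foldB_length (positions : List Int) (w acc : List Char) :
    (positions.foldl (pvStep w) acc).length = acc.length := by
  induction positions generalizing acc with
  | nil => rfl
  | cons p ps ih =>
    rw [List.foldl_cons, ih]
    unfold pvStep; split <;> simp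

theorem foldB_getElem (positions : List Int) (w acc : List Char)
    (hlen : acc.length = w.length) (i : ℕ) (hi : i < w.length) :
    (positions.foldl (pvStep w) acc)[i]'(by rw [foldB_length, hlen]; exact hi) =
      if (i : Int) ∈ positions then w[i] else acc[i]'(by omega) := by
  induction positions generalizing acc with
  | nil => simp
  | cons p ps ih =>
    have hslen : (pvStep w acc p).length = w.length := by
      unfold pvStep; split <;> simp [hlen]
    simp only [List.foldl_cons]
    rw [ih (pvStep w acc p) hslen]
    by_cases hips : (i : Int) ∈ ps
    · simp [hips]
    · rw [if_neg hips]
      by_cases hip : (i : Int) = p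
      · have hnat : p.toNat = i := by omega
        have hmem : (i : Int) ∈ p :: ps := by simp [hip]
        rw [if_pos hmem]
        have h1 : pvStep w acc p = acc.set i (w.getD i '-') := by
          unfold pvStep; rw [if_pos ⟨by omega, by omega⟩, hnat]
        rw [List.getElem_of_eq h1]
        simp [List.getD_eq_getElem?_getD, List.getElem?_eq_getElem hi]
      · have hmem : ¬ ((i : Int) ∈ p :: ps) := by simp [hip, hips]
        rw [if_neg hmem]
        unfold pvStep
        split
        · next hr =>
          have hne : p.toNat ≠ i := by omega
          exact List.getElem_set_ne hne _
        · rfl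

theorem foldB_eq_mask (positions : List Int) (w : List Char) :
    (positions.foldl (pvStep w) (List.replicate w.length '-')) = pvMask positions w 0 := by
  apply List.ext_getElem (by simp [foldB_length, pvMask_length])
  intro i h1 h2
  have hi : i < w.length := by simpa [foldB_length] using h1
  rw [foldB_getElem positions w _ (by simp) i hi, pvMask_getElem]
  simp

-- ===== VERDICT (by name: the statement is the Claim_ definition above) =====
theorem affiche_lettres_trouvees_spec : Claim_equal_affiche_lettres_trouvees := by
  intro positions mot _
  show _ = _
  unfold affiche_lettres_trouvees affiche_lettres_trouvees_alt
  rw [foldA_eq, show (fun (res : List Char) p =>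
        if 0 ≤ p ∧ p < (mot.toList.length : Int) then
          res.set p.toNat (mot.toList.getD p.toNat '-')
        else res) = pvStep mot.toList from rfl, foldB_eq_mask]
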